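-- pv_equiv track=rewrite | github.com/YashReddy1963/pralay-backend | Pralay/video_verification_service.py | is_hazard_type_compatible
-- ===== SOURCE A (Python) =====
-- def is_hazard_type_compatible(selected_type: str, detected_type: str) -> bool:
--     """
--     Check if two hazard types are compatible.
--
--     Args:
--         selected_type: User-selected hazard type
--         detected_type: AI-detected hazard type
--
--     Returns:
--         True if types are compatible, False otherwise
--     """
--     # Exact match
--     if selected_type == detected_type:
--         return True
--
--     # Define compatible hazard type groups
--     compatible_groups = {
--         'water_hazards': ['flooding', 'storm-surge', 'high-waves', 'tsunami'],
--         'weather_hazards': ['storm-surge', 'tsunami', 'high-waves'],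
--         'environmental_hazards': ['pollution', 'debris', 'erosion'],
--         'marine_hazards': ['wildlife', 'pollution', 'debris']
--     }
--
--     # Check if both types are in the same compatible group
--     for group_name, types in compatible_groups.items():
--         if selected_type in types and detected_type in types:
--             return True
--
--     # Special cases for very similar hazard types
--     similar_pairs = [
--         ('flooding', 'storm-surge'),
--         ('storm-surge', 'high-waves'),
--         ('high-waves', 'tsunami'),
--         ('pollution', 'debris'),
--         ('erosion', 'debris')
--     ]
--
--     for pair in similar_pairs:
--         if (selected_type == pair[0] and detected_type == pair[1]) or \
--            (selected_type == pair[1] and detected_type == pair[0]):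
--             return True
--
--     return False
-- ===== SOURCE B (Python) =====
-- _GROUPS = [
--     ['flooding', 'storm-surge', 'high-waves', 'tsunami'],
--     ['storm-surge', 'tsunami', 'high-waves'],
--     ['pollution', 'debris', 'erosion'],
--     ['wildlife', 'pollution', 'debris'],
-- ]
--
-- _PAIRS = [
--     ('flooding', 'storm-surge'),
--     ('storm-surge', 'high-waves'),
--     ('high-waves', 'tsunami'),
--     ('pollution', 'debris'),
--     ('erosion', 'debris'),
-- ]
--
--
-- def _build_compat():
--     compat = {}
--     for types in _GROUPS:
--         for a in types:
--             for b in types: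
--                 if a != b:
--                     compat.setdefault(a, set()).add(b)
--     for a, b in _PAIRS:
--         compat.setdefault(a, set()).add(b)
--         compat.setdefault(b, set()).add(a)
--     return compat
--
--
-- _COMPAT = _build_compat()
--
--
-- def is_hazard_type_compatible(selected_type: str, detected_type: str) -> bool:
--     """Check if two hazard types are compatible (single precomputed lookup)."""
--     return (selected_type == detected_type
--             or detected_type in _COMPAT.get(selected_type, ()))
-- ===== Notes on version B (the rewrite author's own statement) =====
-- stated objective: faster
-- what changed: Replaces the per-call scans over the group dict and the similar-pairs list with a symmetric compatibility index built once at import time, so each call is an equality test plus one dict lookup and one set membership.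
import Mathlib
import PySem

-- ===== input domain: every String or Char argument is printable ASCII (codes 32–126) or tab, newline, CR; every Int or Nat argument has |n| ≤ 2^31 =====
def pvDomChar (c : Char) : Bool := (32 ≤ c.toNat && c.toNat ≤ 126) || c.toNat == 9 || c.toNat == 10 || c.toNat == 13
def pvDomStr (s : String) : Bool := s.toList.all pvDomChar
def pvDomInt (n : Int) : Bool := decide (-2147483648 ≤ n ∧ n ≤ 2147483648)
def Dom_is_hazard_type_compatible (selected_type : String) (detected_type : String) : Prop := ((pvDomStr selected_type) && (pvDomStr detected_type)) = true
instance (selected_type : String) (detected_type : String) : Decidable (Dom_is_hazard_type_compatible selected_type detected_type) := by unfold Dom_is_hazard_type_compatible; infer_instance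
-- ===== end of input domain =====

-- B replaces A's per-call scans over the groups and the similar-pairs list with a
-- symmetric compatibility index built once, so a call is one lookup plus membership.

-- ===== PORT A =====
-- A's compatible_groups dict (insertion order) and similar_pairs list, as literals.
def pvGroupsA : PySem.Dict String (List String) := PySem.Dict.mk
  [ ("water_hazards", ["flooding", "storm-surge", "high-waves", "tsunami"])
  , ("weather_hazards", ["storm-surge", "tsunami", "high-waves"])
  , ("environmental_hazards", ["pollution", "debris", "erosion"])
  , ("marine_hazards", ["wildlife", "pollution", "debris"]) ]

def pvPairsA : List (String × String) :=
  [ ("flooding", "storm-surge")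
  , ("storm-surge", "high-waves")
  , ("high-waves", "tsunami")
  , ("pollution", "debris")
  , ("erosion", "debris") ]

def is_hazard_type_compatible (selected_type : String) (detected_type : String) : Bool :=
  if selected_type == detected_type then true
  else if pvGroupsA.items.any (fun gt => gt.2.contains selected_type && gt.2.contains detected_type) then true
  else if pvPairsA.any (fun pair =>
      (selected_type == pair.1 && detected_type == pair.2) ||
      (selected_type == pair.2 && detected_type == pair.1)) then true
  else false

-- ===== PORT B =====
def pvGroupsB : List (List String) :=
  [ ["flooding", "storm-surge", "high-waves", "tsunami"]
  , ["storm-surge", "tsunami", "high-waves"]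
  , ["pollution", "debris", "erosion"]
  , ["wildlife", "pollution", "debris"] ]

def pvPairsB : List (String × String) :=
  [ ("flooding", "storm-surge")
  , ("storm-surge", "high-waves")
  , ("high-waves", "tsunami")
  , ("pollution", "debris")
  , ("erosion", "debris") ]

-- compat.setdefault(a, set()).add(b)
def pvAddEdge (d : PySem.Dict String (PySem.Set String)) (a b : String) :
    PySem.Dict String (PySem.Set String) :=
  d.insert a (PySem.Set.add (d.getD a PySem.Set.empty) b)

def pvCompat : PySem.Dict String (PySem.Set String) :=
  pvPairsB.foldl (fun d p => pvAddEdge (pvAddEdge d p.1 p.2) p.2 p.1)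
    (pvGroupsB.foldl
      (fun d types => types.foldl
        (fun d a => types.foldl
          (fun d b => if a != b then pvAddEdge d a b else d) d) d)
      PySem.Dict.empty)

def is_hazard_type_compatible_alt (selected_type : String) (detected_type : String) : Bool :=
  selected_type == detected_type ||
    PySem.Set.contains (pvCompat.getD selected_type PySem.Set.empty) detected_type

-- ===== PRECONDITION & SPEC =====
def Spec_is_hazard_type_compatible (selected_type : String) (detected_type : String) (out : Bool) : Prop := out = is_hazard_type_compatible_alt selected_type detected_type
instance (selected_type : String) (detected_type : String) (out : Bool) : Decidable (Spec_is_hazard_type_compatible selected_type detected_type out) := by unfold Spec_is_hazard_type_compatible; infer_instance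

-- ===== CLAIM (what is proved, stated in full; the proofs are below) =====
def Claim_equal_is_hazard_type_compatible : Prop := ∀ (selected_type : String) (detected_type : String), Dom_is_hazard_type_compatible selected_type detected_type → Spec_is_hazard_type_compatible selected_type detected_type (is_hazard_type_compatible selected_type detected_type)

-- ===== LEMMAS AND PROOFS =====

-- the compatibility index B builds, as a literal (closed-term evaluation)
set_option maxRecDepth 8192 in
theorem pvCompat_eq : pvCompat = PySem.Dict.mk
    [ ("flooding", ["storm-surge", "high-waves", "tsunami"])
    , ("storm-surge", ["flooding", "high-waves", "tsunami"])
    , ("high-waves", ["flooding", "storm-surge", "tsunami"])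
    , ("tsunami", ["flooding", "storm-surge", "high-waves"])
    , ("pollution", ["debris", "erosion", "wildlife"])
    , ("debris", ["pollution", "erosion", "wildlife"])
    , ("erosion", ["pollution", "debris"])
    , ("wildlife", ["pollution", "debris"]) ] := by
  decide

-- every string is one of the eight hazard words or none of them
set_option maxRecDepth 4096 in
theorem pvStrCase (x : String) :
    x = "flooding" ∨ x = "storm-surge" ∨ x = "high-waves" ∨ x = "tsunami" ∨
    x = "pollution" ∨ x = "debris" ∨ x = "erosion" ∨ x = "wildlife" ∨
    (x ≠ "flooding" ∧ x ≠ "storm-surge" ∧ x ≠ "high-waves" ∧ x ≠ "tsunami" ∧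
     x ≠ "pollution" ∧ x ≠ "debris" ∧ x ≠ "erosion" ∧ x ≠ "wildlife") := by
  by_cases h1 : x = "flooding" <;> by_cases h2 : x = "storm-surge" <;>
    by_cases h3 : x = "high-waves" <;> by_cases h4 : x = "tsunami" <;>
    by_cases h5 : x = "pollution" <;> by_cases h6 : x = "debris" <;>
    by_cases h7 : x = "erosion" <;> by_cases h8 : x = "wildlife" <;> tauto

set_option maxRecDepth 8192 in
theorem pvKey (s d : String) :
    is_hazard_type_compatible s d = is_hazard_type_compatible_alt s d := by
  rcases pvStrCase s with rfl | rfl | rfl | rfl | rfl | rfl | rfl | rfl | hs <;>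
    rcases pvStrCase d with rfl | rfl | rfl | rfl | rfl | rfl | rfl | rfl | hd <;>
    first
      | decide
      | (obtain ⟨h1, h2, h3, h4, h5, h6, h7, h8⟩ := hs
         first
           | (obtain ⟨g1, g2, g3, g4, g5, g6, g7, g8⟩ := hd
              simp [is_hazard_type_compatible, is_hazard_type_compatible_alt,
                pvGroupsA, pvPairsA, pvCompat_eq, PySem.Dict.getD, PySem.Dict.get?,
                PySem.Set.contains, List.contains_eq_mem, beq_eq_decide,
                h1, h2, h3, h4, h5, h6, h7, h8, g1, g2, g3, g4, g5, g6, g7, g8,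
                Ne.symm h1, Ne.symm h2, Ne.symm h3, Ne.symm h4,
                Ne.symm h5, Ne.symm h6, Ne.symm h7, Ne.symm h8])
           | simp [is_hazard_type_compatible, is_hazard_type_compatible_alt,
                pvGroupsA, pvPairsA, pvCompat_eq, PySem.Dict.getD, PySem.Dict.get?,
                PySem.Set.contains, List.contains_eq_mem, beq_eq_decide,
               h1, h2, h3, h4, h5, h6, h7, h8,
               Ne.symm h1, Ne.symm h2, Ne.symm h3, Ne.symm h4,
               Ne.symm h5, Ne.symm h6, Ne.symm h7, Ne.symm h8])
      | (obtain ⟨h1, h2, h3, h4, h5, h6, h7, h8⟩ := hd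
         simp [is_hazard_type_compatible, is_hazard_type_compatible_alt,
                pvGroupsA, pvPairsA, pvCompat_eq, PySem.Dict.getD, PySem.Dict.get?,
                PySem.Set.contains, List.contains_eq_mem, beq_eq_decide,
           h1, h2, h3, h4, h5, h6, h7, h8,
           Ne.symm h1, Ne.symm h2, Ne.symm h3, Ne.symm h4,
           Ne.symm h5, Ne.symm h6, Ne.symm h7, Ne.symm h8])

-- ===== VERDICT (by name: the statement is the Claim_ definition above) =====
theorem is_hazard_type_compatible_spec : Claim_equal_is_hazard_type_compatible := by
  intro s d _
  exact pvKey s d
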